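-- pv_equiv track=rewrite | github.com/ahs2202/biobookshelf | biobookshelf/STR/string.py | Find_stretch_of_a_character
-- ===== SOURCE A (Python) =====
-- def Find_stretch_of_a_character( a_str, a_char, int_len_threshold = 1 ) :
--     """
--     Find locations of stretches of a character
--     'int_len_threshold' : a number of characters in a stretch to be classified as a 'stretch'
--     return a list of [ index_start, index_end, length_of_stretch ] of identified stretches
--     """
--     # set default values
--     flag_stretch_started = False
--     index_start = None
--     index = 0
--     l_l = list( )
--     for current_char in a_str :
--         if flag_stretch_started :
--             if current_char != a_char : # when stretch has been started and has ended
--                 flag_stretch_started = False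
--                 len_stretch = index - index_start
--                 if len_stretch >= int_len_threshold :
--                     l_l.append( [ index_start, index, len_stretch ] )
--                 index_start = None
--         else :
--             if current_char == a_char : # when stretch has just started
--                 flag_stretch_started = True
--                 index_start = index
--         index += 1
--     if index_start is not None : # if stretch of a character ends with the given string
--         len_stretch = index - index_start
--         if len_stretch >= int_len_threshold :
--             l_l.append( [ index_start, index, len_stretch ] )
--     return l_l
-- ===== SOURCE B (Python) =====
-- def Find_stretch_of_a_character(a_str, a_char, int_len_threshold=1):
--     """Two-pointer run scan: find each maximal run, emit it if it is a long-enough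
--     run of a_char; no flag state machine, no post-loop tail handling."""
--     l_l = []
--     i = 0
--     n = len(a_str)
--     while i < n:
--         j = i
--         while j < n and a_str[j] == a_str[i]:
--             j += 1
--         if a_str[i] == a_char and j - i >= int_len_threshold:
--             l_l.append([i, j, j - i])
--         i = j
--     return l_l
-- ===== Notes on version B (the rewrite author's own statement) =====
-- stated objective: simpler
-- what changed: Replaced the flag/start-index state machine with post-loop tail handling by a two-pointer scan over maximal runs that emits each qualifying run directly.
import Mathlib
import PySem

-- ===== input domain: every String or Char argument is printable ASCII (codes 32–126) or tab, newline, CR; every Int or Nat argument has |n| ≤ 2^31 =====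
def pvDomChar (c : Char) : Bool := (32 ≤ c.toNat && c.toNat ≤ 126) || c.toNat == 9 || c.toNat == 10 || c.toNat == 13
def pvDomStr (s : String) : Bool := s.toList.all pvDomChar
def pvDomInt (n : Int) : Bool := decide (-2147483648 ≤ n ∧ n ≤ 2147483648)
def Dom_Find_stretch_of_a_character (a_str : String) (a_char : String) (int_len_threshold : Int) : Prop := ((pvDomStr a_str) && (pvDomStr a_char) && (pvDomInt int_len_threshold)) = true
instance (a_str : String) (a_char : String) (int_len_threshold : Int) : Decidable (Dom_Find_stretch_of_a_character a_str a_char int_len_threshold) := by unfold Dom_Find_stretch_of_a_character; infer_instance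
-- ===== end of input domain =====

-- B replaces A's flag/start-index state machine (with its post-loop tail handling) by a
-- two-pointer scan over maximal runs; same cost, simpler control flow. Return value only.

-- ===== PORT A =====
-- state: (flag_stretch_started, index_start, index, l_l); one step per character of a_str
def pvAStep (ach : List Char) (t : Int)
    (st : Bool × Option Int × Int × List (List Int)) (c : Char) :
    Bool × Option Int × Int × List (List Int) :=
  match st with
  | (flag, index_start, index, l_l) =>
    if flag then
      if [c] ≠ ach then  -- stretch has been started and has ended
        match index_start with
        | some s =>
          if index - s ≥ t then (false, none, index + 1, l_l ++ [[s, index, index - s]])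
          else (false, none, index + 1, l_l)
        | none => (false, none, index + 1, l_l)  -- unreachable: flag implies index_start is some
      else (flag, index_start, index + 1, l_l)
    else
      if [c] = ach then (true, some index, index + 1, l_l)  -- stretch has just started
      else (flag, index_start, index + 1, l_l)

-- the post-loop 'if index_start is not None' tail handling
def pvAFinish (t : Int) (st : Bool × Option Int × Int × List (List Int)) : List (List Int) :=
  match st with
  | (_, some s, index, l_l) =>
    if index - s ≥ t then l_l ++ [[s, index, index - s]] else l_l
  | (_, none, _, l_l) => l_l

def Find_stretch_of_a_character (a_str : String) (a_char : String) (int_len_threshold : Int) : List (List Int) :=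
  pvAFinish int_len_threshold
    (a_str.toList.foldl (pvAStep a_char.toList int_len_threshold) (false, none, 0, []))

-- ===== PORT B =====
-- the inner 'while j < n and a_str[j] == a_str[i]' loop: length of the run of c and the rest
def pvTakeRun (c : Char) : List Char → Nat × List Char
  | [] => (0, [])
  | x :: xs => if x = c then let p := pvTakeRun c xs; (p.1 + 1, p.2) else (0, x :: xs)

theorem pvTakeRun_len (c : Char) (xs : List Char) : (pvTakeRun c xs).2.length ≤ xs.length := by
  induction xs with
  | nil => simp [pvTakeRun]
  | cons x xs ih =>
    simp only [pvTakeRun]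
    split
    · exact Nat.le_succ_of_le ih
    · exact Nat.le_refl _

-- the outer 'while i < n' loop of B: one iteration per maximal run, i is the run's start index
def pvBScan (ach : List Char) (t : Int) : List Char → Int → List (List Int)
  | [], _ => []
  | c :: xs, i =>
    let p := pvTakeRun c xs
    let j : Int := i + (p.1 : Int) + 1
    if [c] = ach ∧ j - i ≥ t then [i, j, j - i] :: pvBScan ach t p.2 j
    else pvBScan ach t p.2 j
termination_by l _ => l.length
decreasing_by all_goals exact Nat.lt_succ_of_le (pvTakeRun_len c xs)

def Find_stretch_of_a_character_alt (a_str : String) (a_char : String) (int_len_threshold : Int) : List (List Int) :=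
  pvBScan a_char.toList int_len_threshold a_str.toList 0

-- ===== PRECONDITION & SPEC =====
def Spec_Find_stretch_of_a_character (a_str : String) (a_char : String) (int_len_threshold : Int) (out : List (List Int)) : Prop := out = Find_stretch_of_a_character_alt a_str a_char int_len_threshold
instance (a_str : String) (a_char : String) (int_len_threshold : Int) (out : List (List Int)) : Decidable (Spec_Find_stretch_of_a_character a_str a_char int_len_threshold out) := by unfold Spec_Find_stretch_of_a_character; infer_instance

-- ===== CLAIM (what is proved, stated in full; the proofs are below) =====
def Claim_equal_Find_stretch_of_a_character : Prop := ∀ (a_str : String) (a_char : String) (int_len_threshold : Int), Dom_Find_stretch_of_a_character a_str a_char int_len_threshold → Spec_Find_stretch_of_a_character a_str a_char int_len_threshold (Find_stretch_of_a_character a_str a_char int_len_threshold)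

-- ===== LEMMAS AND PROOFS =====

theorem pvTakeRun_eq (c : Char) (xs : List Char) :
    xs = List.replicate (pvTakeRun c xs).1 c ++ (pvTakeRun c xs).2 := by
  induction xs with
  | nil => simp [pvTakeRun]
  | cons x xs ih =>
    simp only [pvTakeRun]
    split
    · rename_i h; subst h; simpa [List.replicate_succ] using ih
    · simp

theorem pvTakeRun_head (c : Char) (xs : List Char) (d : Char) (r : List Char)
    (h : (pvTakeRun c xs).2 = d :: r) : d ≠ c := by
  induction xs with
  | nil => simp [pvTakeRun] at h
  | cons x xs ih =>
    simp only [pvTakeRun] at h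
    split at h
    · exact ih h
    · rename_i hx; cases h; exact fun hdc => hx hdc

-- folding A's step over a run of a non-matching character only advances the index
theorem pvA_nomatch (ach : List Char) (t : Int) (c : Char) (h : [c] ≠ ach) :
    ∀ (n : Nat) (i : Int) (acc : List (List Int)),
      List.foldl (pvAStep ach t) (false, none, i, acc) (List.replicate n c)
        = (false, none, i + n, acc) := by
  intro n
  induction n with
  | zero => intro i acc; simp
  | succ n ih =>
    intro i acc
    rw [List.replicate_succ, List.foldl_cons]
    have hstep : pvAStep ach t (false, none, i, acc) c = (false, none, i + 1, acc) := by
      simp [pvAStep, h]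
    rw [hstep, ih]
    simp only [Prod.mk.injEq, true_and, and_true]
    push_cast
    ring

-- folding A's step over a run of the matching character keeps the open stretch
theorem pvA_keep (ach : List Char) (t : Int) (c : Char) (h : [c] = ach) :
    ∀ (n : Nat) (s i : Int) (acc : List (List Int)),
      List.foldl (pvAStep ach t) (true, some s, i, acc) (List.replicate n c)
        = (true, some s, i + n, acc) := by
  intro n
  induction n with
  | zero => intro s i acc; simp
  | succ n ih =>
    intro s i acc
    rw [List.replicate_succ, List.foldl_cons]
    have hstep : pvAStep ach t (true, some s, i, acc) c = (true, some s, i + 1, acc) := by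
      simp [pvAStep, h]
    rw [hstep, ih]
    simp only [Prod.mk.injEq, true_and, and_true]
    push_cast
    ring

theorem pvBScan_nil (ach : List Char) (t : Int) (i : Int) : pvBScan ach t [] i = [] := by
  simp [pvBScan]

theorem pvBScan_cons (ach : List Char) (t : Int) (c : Char) (xs : List Char) (i : Int) :
    pvBScan ach t (c :: xs) i =
      if [c] = ach ∧ (i + ((pvTakeRun c xs).1 : Int) + 1) - i ≥ t then
        [i, i + ((pvTakeRun c xs).1 : Int) + 1, (i + ((pvTakeRun c xs).1 : Int) + 1) - i]
          :: pvBScan ach t (pvTakeRun c xs).2 (i + ((pvTakeRun c xs).1 : Int) + 1)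
      else pvBScan ach t (pvTakeRun c xs).2 (i + ((pvTakeRun c xs).1 : Int) + 1) := by
  rw [pvBScan]

-- main invariant: A's fold started outside a stretch, followed by the tail handling,
-- produces the accumulator followed by B's run scan
theorem pv_main (ach : List Char) (t : Int) :
    ∀ (N : Nat) (l : List Char), l.length ≤ N → ∀ (i : Int) (acc : List (List Int)),
      pvAFinish t (List.foldl (pvAStep ach t) (false, none, i, acc) l)
        = acc ++ pvBScan ach t l i := by
  intro N
  induction N with
  | zero =>
    intro l hl i acc
    have : l = [] := List.eq_nil_of_length_eq_zero (Nat.le_zero.mp hl)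
    subst this
    simp [pvAFinish, pvBScan_nil]
  | succ N ih =>
    intro l hl i acc
    match l with
    | [] => simp [pvAFinish, pvBScan_nil]
    | c :: xs =>
      have hxs : xs.length ≤ N := by simpa using hl
      obtain ⟨n, r, hp⟩ : ∃ n r, pvTakeRun c xs = (n, r) := ⟨_, _, rfl⟩
      have hsplit : xs = List.replicate n c ++ r := by
        have := pvTakeRun_eq c xs; rwa [hp] at this
      have hrlen : r.length ≤ N := by
        have := pvTakeRun_len c xs; rw [hp] at this
        exact Nat.le_trans this hxs
      rw [pvBScan_cons, hp]
      dsimp only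
      by_cases hc : [c] = ach
      · -- first character starts a stretch; the rest of the run keeps it open
        rw [List.foldl_cons]
        have hstep : pvAStep ach t (false, none, i, acc) c = (true, some i, i + 1, acc) := by
          simp [pvAStep, hc]
        have hfold : List.foldl (pvAStep ach t) (true, some i, i + 1, acc) xs
            = List.foldl (pvAStep ach t) (true, some i, i + (n : Int) + 1, acc) r := by
          rw [hsplit, List.foldl_append, pvA_keep ach t c hc,
            show i + 1 + (n : Int) = i + (n : Int) + 1 from by ring]
        rw [hstep, hfold]
        match r, hrlen with
        | [], _ =>
          -- the stretch runs to the end of the string: the tail handling fires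
          simp only [List.foldl_nil, pvAFinish, pvBScan_nil]
          by_cases hth : (i + (n : Int) + 1) - i ≥ t
          · rw [if_pos hth, if_pos ⟨hc, hth⟩]
          · rw [if_neg hth, if_neg (fun h => hth h.2)]
            simp
        | d :: r', hrlen =>
          -- the next character closes the stretch
          have hd : [d] ≠ ach := by
            intro hdach
            have hdc : d = c := by
              have : [d] = [c] := hdach.trans hc.symm
              simpa using this
            exact pvTakeRun_head c xs d r' (by rw [hp]) hdc
          rw [List.foldl_cons]
          have hclose : pvAStep ach t (true, some i, i + (n : Int) + 1, acc) d
              = (false, none, i + (n : Int) + 1 + 1,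
                 if (i + (n : Int) + 1) - i ≥ t
                 then acc ++ [[i, i + (n : Int) + 1, (i + (n : Int) + 1) - i]] else acc) := by
            simp only [pvAStep, hd, ne_eq, not_false_iff, if_pos]
            split <;> simp_all
          rw [hclose]
          obtain ⟨m, r'', hq⟩ : ∃ m r'', pvTakeRun d r' = (m, r'') := ⟨_, _, rfl⟩
          have hsplit' : r' = List.replicate m d ++ r'' := by
            have := pvTakeRun_eq d r'; rwa [hq] at this
          have hr''len : r''.length ≤ N := by
            have h1 := pvTakeRun_len d r'; rw [hq] at h1
            have h2 : (d :: r').length ≤ N := hrlen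
            simp at h1 h2
            omega
          have hfold' : ∀ acc2 : List (List Int),
              List.foldl (pvAStep ach t) (false, none, i + (n : Int) + 1 + 1, acc2) r'
                = List.foldl (pvAStep ach t)
                    (false, none, i + (n : Int) + 1 + (m : Int) + 1, acc2) r'' := by
            intro acc2
            rw [hsplit', List.foldl_append, pvA_nomatch ach t d hd,
              show i + (n : Int) + 1 + 1 + (m : Int) = i + (n : Int) + 1 + (m : Int) + 1 from by
                ring]
          rw [hfold', ih _ hr''len]
          rw [pvBScan_cons, hq]
          dsimp only
          have hdneg : ¬([d] = ach ∧
              (i + (n : Int) + 1 + (m : Int) + 1) - (i + (n : Int) + 1) ≥ t) :=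
            fun h => hd h.1
          by_cases hth : (i + (n : Int) + 1) - i ≥ t
          · rw [if_pos hth, if_pos ⟨hc, hth⟩, if_neg hdneg]
            simp [List.append_assoc]
          · rw [if_neg hth,
              if_neg (show ¬([c] = ach ∧ (i + (n : Int) + 1) - i ≥ t) from fun h => hth h.2),
              if_neg hdneg]
      · -- a run of a non-matching character: only the index advances
        rw [List.foldl_cons]
        have hstep : pvAStep ach t (false, none, i, acc) c = (false, none, i + 1, acc) := by
          simp [pvAStep, hc]
        have hfold : List.foldl (pvAStep ach t) (false, none, i + 1, acc) xs
            = List.foldl (pvAStep ach t) (false, none, i + (n : Int) + 1, acc) r := by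
          rw [hsplit, List.foldl_append, pvA_nomatch ach t c hc,
            show i + 1 + (n : Int) = i + (n : Int) + 1 from by ring]
        rw [hstep, hfold, ih _ hrlen]
        rw [if_neg (fun h => hc h.1)]

-- ===== VERDICT (by name: the statement is the Claim_ definition above) =====
theorem Find_stretch_of_a_character_spec : Claim_equal_Find_stretch_of_a_character := by
  intro a_str a_char t _
  show Find_stretch_of_a_character a_str a_char t = Find_stretch_of_a_character_alt a_str a_char t
  unfold Find_stretch_of_a_character Find_stretch_of_a_character_alt
  simpa using pv_main a_char.toList t a_str.toList.length a_str.toList (le_refl _) 0 []
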